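-- pv_equiv track=rewrite | github.com/alphaXiv/rlm | examples/evaluate-single-paper-dataset.py | intersection_size
-- ===== SOURCE A (Python) =====
-- def merge_intervals(intervals):
--     result = []
--     for start, end in sorted(intervals):
--         if result and start <= result[-1][1]:
--             result[-1] = (result[-1][0], max(result[-1][1], end))
--         else:
--             result.append((start, end))
--     return result
--
-- def intersection_size(a, b):
--     a, b = merge_intervals(a), merge_intervals(b)
--     i = j = total = 0
--     while i < len(a) and j < len(b):
--         lo = max(a[i][0], b[j][0])
--         hi = min(a[i][1], b[j][1])
--         if lo < hi:
--             total += hi - lo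
--         if a[i][1] < b[j][1]:
--             i += 1
--         else:
--             j += 1
--     return total
-- ===== SOURCE B (Python) =====
-- def _union_measure(intervals):
--     total = 0
--     end = None
--     for s, e in sorted(intervals):
--         if end is None or s >= end:
--             if e > s:
--                 total += e - s
--                 end = e
--         elif e > end:
--             total += e - end
--             end = e
--     return total
--
-- def intersection_size(a, b):
--     # |A ∩ B| = |A| + |B| - |A ∪ B| (inclusion-exclusion on total covered length)
--     return _union_measure(a) + _union_measure(b) - _union_measure(list(a) + list(b))
-- ===== Notes on version B (the rewrite author's own statement) =====
-- stated objective: alternative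
-- what changed: Replaces merge-each-set-then-two-pointer with inclusion-exclusion: a single sorted scan measures the union length of a list of intervals, and the answer is measure(a)+measure(b)-measure(a+b).
import Mathlib
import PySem

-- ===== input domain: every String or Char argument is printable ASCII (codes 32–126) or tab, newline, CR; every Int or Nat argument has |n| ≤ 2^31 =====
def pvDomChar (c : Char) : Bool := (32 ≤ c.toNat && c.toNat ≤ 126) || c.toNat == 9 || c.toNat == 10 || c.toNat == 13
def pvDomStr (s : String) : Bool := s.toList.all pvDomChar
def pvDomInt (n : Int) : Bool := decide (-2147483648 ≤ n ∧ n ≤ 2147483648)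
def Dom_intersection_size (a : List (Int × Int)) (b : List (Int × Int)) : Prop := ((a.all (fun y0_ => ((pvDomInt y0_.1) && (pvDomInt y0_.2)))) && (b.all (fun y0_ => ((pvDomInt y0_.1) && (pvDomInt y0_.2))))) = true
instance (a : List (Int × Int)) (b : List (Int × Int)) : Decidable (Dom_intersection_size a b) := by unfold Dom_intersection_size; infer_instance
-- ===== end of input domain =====

-- B replaces merge-then-two-pointer by inclusion-exclusion over a single-scan union measure
-- (objective: alternative algorithm of the same cost).

-- ===== PORT A =====

-- sorted(intervals): Python's tuple sort = lexicographic on the two components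
def pySortIv (l : List (Int × Int)) : List (Int × Int) :=
  PySem.List.sorted2 l (fun p => p.1) (fun p => p.2)

-- body of merge_intervals's for-loop; the Python append/mutate-last list is kept as a
-- REVERSED accumulator (head = result[-1]), reversed once at the end
def mergeStep (acc : List (Int × Int)) (c : Int × Int) : List (Int × Int) :=
  match acc with
  | [] => [c]
  | (ps, pe) :: rest =>
      if c.1 ≤ pe then (ps, max pe c.2) :: rest else c :: (ps, pe) :: rest

def merge_intervals (l : List (Int × Int)) : List (Int × Int) :=
  ((pySortIv l).foldl mergeStep []).reverse

-- the while-loop over indices i, j, ported as structural recursion on the two suffixes,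
-- with `total` carried as an accumulator
def twoPtr : Int → List (Int × Int) → List (Int × Int) → Int
  | total, (sa, ea) :: as', (sb, eb) :: bs' =>
      let lo := max sa sb
      let hi := min ea eb
      let total' := if lo < hi then total + (hi - lo) else total
      if ea < eb then twoPtr total' as' ((sb, eb) :: bs')
      else twoPtr total' ((sa, ea) :: as') bs'
  | total, _, _ => total
  termination_by _ a b => a.length + b.length

def intersection_size (a : List (Int × Int)) (b : List (Int × Int)) : Int :=
  twoPtr 0 (merge_intervals a) (merge_intervals b)

-- ===== PORT B =====

-- body of _union_measure's for-loop; state = (total, end) with end = None before the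
-- first counted interval
def measStep (st : Int × Option Int) (c : Int × Int) : Int × Option Int :=
  match st.2 with
  | none => if c.2 > c.1 then (st.1 + (c.2 - c.1), some c.2) else (st.1, st.2)
  | some en =>
      if c.1 ≥ en then
        (if c.2 > c.1 then (st.1 + (c.2 - c.1), some c.2) else (st.1, st.2))
      else if c.2 > en then (st.1 + (c.2 - en), some c.2) else (st.1, st.2)

def union_measure (l : List (Int × Int)) : Int :=
  ((pySortIv l).foldl measStep (0, none)).1

def intersection_size_alt (a : List (Int × Int)) (b : List (Int × Int)) : Int :=
  union_measure a + union_measure b - union_measure (a ++ b)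

-- ===== PRECONDITION & SPEC =====
def Spec_intersection_size (a : List (Int × Int)) (b : List (Int × Int)) (out : Int) : Prop := out = intersection_size_alt a b
instance (a : List (Int × Int)) (b : List (Int × Int)) (out : Int) : Decidable (Spec_intersection_size a b out) := by unfold Spec_intersection_size; infer_instance

-- ===== CLAIM (what is proved, stated in full; the proofs are below) =====
def Claim_equal_intersection_size : Prop := ∀ (a : List (Int × Int)) (b : List (Int × Int)), Dom_intersection_size a b → Spec_intersection_size a b (intersection_size a b)

-- ===== LEMMAS AND PROOFS =====

-- the set of integer points covered by a list of intervals (each [s, e) ∩ ℤ)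
noncomputable def covSet (l : List (Int × Int)) : Finset ℤ :=
  l.foldr (fun c acc => Finset.Ico c.1 c.2 ∪ acc) ∅

theorem mem_covSet {l : List (Int × Int)} {x : ℤ} :
    x ∈ covSet l ↔ ∃ c ∈ l, c.1 ≤ x ∧ x < c.2 := by
  induction l with
  | nil => simp [covSet]
  | cons c t ih =>
      show x ∈ Finset.Ico c.1 c.2 ∪ covSet t ↔ _
      simp only [Finset.mem_union, Finset.mem_Ico, ih, List.mem_cons]
      constructor
      · rintro (h | ⟨d, hd, h⟩)
        · exact ⟨c, Or.inl rfl, h⟩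
        · exact ⟨d, Or.inr hd, h⟩
      · rintro ⟨d, (rfl | hd), h⟩
        · exact Or.inl h
        · exact Or.inr ⟨d, hd, h⟩

theorem covSet_append (l m : List (Int × Int)) : covSet (l ++ m) = covSet l ∪ covSet m := by
  ext x
  simp only [Finset.mem_union, mem_covSet, List.mem_append]
  constructor
  · rintro ⟨d, (hd | hd), h⟩
    · exact Or.inl ⟨d, hd, h⟩
    · exact Or.inr ⟨d, hd, h⟩
  · rintro (⟨d, hd, h⟩ | ⟨d, hd, h⟩)
    · exact ⟨d, Or.inl hd, h⟩
    · exact ⟨d, Or.inr hd, h⟩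

theorem covSet_perm {l m : List (Int × Int)} (h : l.Perm m) : covSet l = covSet m := by
  ext x; simp only [mem_covSet]
  constructor <;> rintro ⟨c, hc, hx⟩ <;> exact ⟨c, by first | exact ⟨h.mem_iff.mp hc, hx⟩ | exact ⟨h.mem_iff.mpr hc, hx⟩⟩

theorem covSet_cons (c : Int × Int) (l : List (Int × Int)) :
    covSet (c :: l) = Finset.Ico c.1 c.2 ∪ covSet l := rfl

-- points of covSet lie below every later interval of a `sep`-pairwise list
def sep (p q : Int × Int) : Prop := p.2 < q.1 ∧ p.1 ≤ q.1

theorem covSet_gt_of_sep {c : Int × Int} {L : List (Int × Int)}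
    (h : List.Pairwise sep (c :: L)) {x : ℤ} (hx : x ∈ covSet L) : c.2 < x := by
  rcases mem_covSet.mp hx with ⟨d, hd, h1, _⟩
  exact lt_of_lt_of_le ((List.pairwise_cons.mp h).1 d hd).1 h1

-- sortedness of pySortIv (nondecreasing first components)
theorem pairwise_fst_insertBy (x : Int × Int) (ys : List (Int × Int))
    (h : List.Pairwise (fun p q : Int × Int => p.1 ≤ q.1) ys) :
    List.Pairwise (fun p q : Int × Int => p.1 ≤ q.1)
      (PySem.List.insertBy (fun a b : Int × Int =>
        decide (a.1 < b.1) || (!decide (b.1 < a.1) && decide (a.2 < b.2))) x ys) := by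
  induction ys with
  | nil => simp [PySem.List.insertBy]
  | cons y t ih =>
      rw [List.pairwise_cons] at h
      by_cases hb : (decide (x.1 < y.1) || (!decide (y.1 < x.1) && decide (x.2 < y.2))) = true
      · rw [PySem.List.insertBy, if_pos hb]
        have hxy : x.1 ≤ y.1 := by
          simp only [Bool.or_eq_true, Bool.and_eq_true, Bool.not_eq_true', decide_eq_true_eq,
            decide_eq_false_iff_not] at hb
          rcases hb with h1 | ⟨h1, _⟩ <;> omega
        refine List.pairwise_cons.mpr ⟨?_, List.pairwise_cons.mpr ⟨h.1, h.2⟩⟩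
        intro z hz
        rcases List.mem_cons.mp hz with rfl | hz
        · exact hxy
        · exact le_trans hxy (h.1 z hz)
      · rw [PySem.List.insertBy, if_neg hb]
        have hyx : y.1 ≤ x.1 := by
          simp only [Bool.or_eq_true, Bool.and_eq_true, Bool.not_eq_true', decide_eq_true_eq,
            decide_eq_false_iff_not] at hb
          omega
        refine List.pairwise_cons.mpr ⟨?_, ih h.2⟩
        intro z hz
        rcases (PySem.List.mem_insertBy _ x z t).mp hz with rfl | hz
        · exact hyx
        · exact h.1 z hz

theorem pairwise_fst_foldl (l : List (Int × Int)) : ∀ acc,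
    List.Pairwise (fun p q : Int × Int => p.1 ≤ q.1) acc →
    List.Pairwise (fun p q : Int × Int => p.1 ≤ q.1)
      (l.foldl (fun acc x => PySem.List.insertBy (fun a b : Int × Int =>
        decide (a.1 < b.1) || (!decide (b.1 < a.1) && decide (a.2 < b.2))) x acc) acc) := by
  induction l with
  | nil => intro acc h; exact h
  | cons c t ih => intro acc h; exact ih _ (pairwise_fst_insertBy c acc h)

theorem pairwise_fst_sorted (l : List (Int × Int)) :
    List.Pairwise (fun p q : Int × Int => p.1 ≤ q.1) (pySortIv l) :=
  pairwise_fst_foldl l [] (List.Pairwise.nil)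

theorem covSet_sorted (l : List (Int × Int)) : covSet (pySortIv l) = covSet l :=
  covSet_perm (PySem.List.sorted2_perm l _ _ false)

-- ---- merge_intervals: chain structure + coverage ----
theorem merge_aux (r : List (Int × Int)) : ∀ (acc : List (Int × Int)),
    List.Pairwise (fun p q : Int × Int => p.1 ≤ q.1) r →
    List.Pairwise (fun p q => sep q p) acc →
    (∀ h : Int × Int, ∀ t, acc = h :: t → ∀ x ∈ r, h.1 ≤ x.1) →
    List.Pairwise (fun p q => sep q p) (r.foldl mergeStep acc) ∧
      covSet (r.foldl mergeStep acc) = covSet acc ∪ covSet r := by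
  induction r with
  | nil =>
      intro acc _ hacc _
      simpa [covSet] using hacc
  | cons c t ih =>
      intro acc hr hacc hhd
      rw [List.pairwise_cons] at hr
      rw [List.foldl_cons]
      match hacceq : acc with
      | [] =>
          have hstep : mergeStep [] c = [c] := rfl
          rw [hstep]
          have := ih [c] hr.2 (List.pairwise_singleton _ _)
            (by rintro h t' ⟨rfl, rfl⟩ x hx; exact hr.1 x hx)
          refine ⟨this.1, ?_⟩
          rw [this.2]
          simp [covSet]
      | (ps, pe) :: rest =>
          have hpsc : ps ≤ c.1 := hhd (ps, pe) rest rfl c (List.mem_cons_self)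
          by_cases hm : c.1 ≤ pe
          · have hstep : mergeStep ((ps, pe) :: rest) c = (ps, max pe c.2) :: rest := by
              simp [mergeStep, hm]
            rw [hstep]
            rw [List.pairwise_cons] at hacc
            have hacc' : List.Pairwise (fun p q => sep q p) ((ps, max pe c.2) :: rest) :=
              List.pairwise_cons.mpr ⟨fun q hq => hacc.1 q hq, hacc.2⟩
            have := ih _ hr.2 hacc'
              (by rintro h t' ⟨rfl, rfl⟩ x hx; exact le_trans hpsc (hr.1 x hx))
            refine ⟨this.1, ?_⟩
            rw [this.2]
            have hico : Finset.Ico ps (max pe c.2) = Finset.Ico ps pe ∪ Finset.Ico c.1 c.2 := by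
              ext x; simp only [Finset.mem_union, Finset.mem_Ico]; omega
            rw [covSet_cons, covSet_cons, hico, covSet_cons]
            ext x; simp only [Finset.mem_union]; tauto
          · have hstep : mergeStep ((ps, pe) :: rest) c = c :: (ps, pe) :: rest := by
              simp [mergeStep, hm]
            rw [hstep]
            have hsepall : ∀ q ∈ (ps, pe) :: rest, sep q c := by
              intro q hq
              rcases List.mem_cons.mp hq with rfl | hq
              · exact ⟨by omega, hpsc⟩
              · rcases (List.pairwise_cons.mp hacc).1 q hq with ⟨h1, h2⟩
                exact ⟨by omega, by omega⟩
            have hacc' : List.Pairwise (fun p q => sep q p) (c :: (ps, pe) :: rest) :=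
              List.pairwise_cons.mpr ⟨hsepall, hacc⟩
            have := ih _ hr.2 hacc'
              (by rintro h t' ⟨rfl, rfl⟩ x hx; exact hr.1 x hx)
            refine ⟨this.1, ?_⟩
            rw [this.2]
            rw [covSet_cons, covSet_cons, covSet_cons (c := c) (l := t)]
            ext x; simp only [Finset.mem_union]; tauto

theorem merge_pairwise (l : List (Int × Int)) :
    List.Pairwise sep (merge_intervals l) := by
  unfold merge_intervals
  rw [List.pairwise_reverse]
  exact (merge_aux (pySortIv l) [] (pairwise_fst_sorted l) List.Pairwise.nil
    (by rintro h t ⟨⟩)).1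

theorem merge_covSet (l : List (Int × Int)) : covSet (merge_intervals l) = covSet l := by
  unfold merge_intervals
  rw [covSet_perm (List.reverse_perm _)]
  rw [(merge_aux (pySortIv l) [] (pairwise_fst_sorted l) List.Pairwise.nil
    (by rintro h t ⟨⟩)).2]
  rw [covSet_perm (l := pySortIv l) (PySem.List.sorted2_perm l _ _ false)]
  simp [covSet]

-- ---- two-pointer = cardinality of the intersection of the coverages ----
theorem twoPtr_eq_aux (n : Nat) : ∀ (M N : List (Int × Int)) (total : Int),
    M.length + N.length ≤ n →
    List.Pairwise sep M → List.Pairwise sep N →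
    twoPtr total M N = total + (((covSet M ∩ covSet N).card : ℕ) : Int) := by
  induction n with
  | zero =>
      intro M N total hlen _ _
      match M, N with
      | [], N => simp [twoPtr, covSet]
      | (c :: M'), N => simp at hlen
  | succ n ih =>
      intro M N total hlen hM hN
      match M, N with
      | [], N => simp [twoPtr, covSet]
      | (c :: M'), [] => simp [twoPtr, covSet]
      | ((sa, ea) :: M'), ((sb, eb) :: N') =>
          rw [twoPtr]
          by_cases hcmp : ea < eb
          · rw [if_pos hcmp]
            have hset : covSet ((sa, ea) :: M') ∩ covSet ((sb, eb) :: N') =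
                Finset.Ico (max sa sb) (min ea eb) ∪ (covSet M' ∩ covSet ((sb, eb) :: N')) := by
              ext x
              simp only [Finset.mem_inter, Finset.mem_union, covSet_cons, Finset.mem_Ico]
              constructor
              · rintro ⟨(hxa | hxa), hb⟩
                · rcases hb with hb | hb
                  · left; omega
                  · have := covSet_gt_of_sep hN hb; omega
                · right; exact ⟨hxa, hb⟩
              · rintro (hx | ⟨h1, h2⟩)
                · exact ⟨Or.inl (by omega), Or.inl (by omega)⟩
                · exact ⟨Or.inr h1, h2⟩
            have hdisj : Disjoint (Finset.Ico (max sa sb) (min ea eb))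
                (covSet M' ∩ covSet ((sb, eb) :: N')) := by
              rw [Finset.disjoint_left]
              intro x hx hx2
              have := covSet_gt_of_sep hM (Finset.mem_inter.mp hx2).1
              simp only [Finset.mem_Ico] at hx
              omega
            rw [ih M' ((sb, eb) :: N') _ (by simp at hlen ⊢; omega) hM.of_cons hN]
            rw [hset, Finset.card_union_of_disjoint hdisj, Int.card_Ico]
            split_ifs with h <;> push_cast <;> omega
          · rw [if_neg hcmp]
            have hset : covSet ((sa, ea) :: M') ∩ covSet ((sb, eb) :: N') =
                Finset.Ico (max sa sb) (min ea eb) ∪ (covSet ((sa, ea) :: M') ∩ covSet N') := by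
              ext x
              simp only [Finset.mem_inter, Finset.mem_union, covSet_cons, Finset.mem_Ico]
              constructor
              · rintro ⟨ha, (hxb | hxb)⟩
                · rcases ha with ha | ha
                  · left; omega
                  · have := covSet_gt_of_sep hM ha; omega
                · right; exact ⟨ha, hxb⟩
              · rintro (hx | ⟨h1, h2⟩)
                · exact ⟨Or.inl (by omega), Or.inl (by omega)⟩
                · exact ⟨h1, Or.inr h2⟩
            have hdisj : Disjoint (Finset.Ico (max sa sb) (min ea eb))
                (covSet ((sa, ea) :: M') ∩ covSet N') := by
              rw [Finset.disjoint_left]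
              intro x hx hx2
              have := covSet_gt_of_sep hN (Finset.mem_inter.mp hx2).2
              simp only [Finset.mem_Ico] at hx
              omega
            rw [ih ((sa, ea) :: M') N' _ (by simp at hlen ⊢; omega) hM hN.of_cons]
            rw [hset, Finset.card_union_of_disjoint hdisj, Int.card_Ico]
            split_ifs with h <;> push_cast <;> omega

theorem twoPtr_eq (M N : List (Int × Int)) (total : Int)
    (hM : List.Pairwise sep M) (hN : List.Pairwise sep N) :
    twoPtr total M N = total + ((covSet M ∩ covSet N).card : Int) :=
  twoPtr_eq_aux (M.length + N.length) M N total le_rfl hM hN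

theorem A_eq (a b : List (Int × Int)) :
    intersection_size a b = ((covSet a ∩ covSet b).card : Int) := by
  unfold intersection_size
  rw [twoPtr_eq _ _ 0 (merge_pairwise a) (merge_pairwise b), merge_covSet, merge_covSet]
  simp

-- ---- union_measure = cardinality of the coverage ----
theorem meas_aux_some (r : List (Int × Int)) : ∀ (P : Finset ℤ) (en s0 : Int),
    List.Pairwise (fun p q : Int × Int => p.1 ≤ q.1) r →
    (∀ x ∈ r, s0 ≤ x.1) →
    (∀ x ∈ P, x < en) → Finset.Ico s0 en ⊆ P →
    (r.foldl measStep ((P.card : Int), some en)).1 = (((P ∪ covSet r).card : ℕ) : Int) := by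
  induction r with
  | nil => intro P en s0 _ _ _ _; simp [covSet]
  | cons c t ih =>
      intro P en s0 hsort hge hlt hsub
      rw [List.pairwise_cons] at hsort
      have hs0 : s0 ≤ c.1 := hge c List.mem_cons_self
      rw [List.foldl_cons]
      by_cases h1 : c.1 ≥ en
      · by_cases h2 : c.2 > c.1
        · have hstep : measStep ((P.card : Int), some en) c
              = ((P.card : Int) + (c.2 - c.1), some c.2) := by
            simp [measStep, h1, h2]
          rw [hstep]
          have hdisj : Disjoint P (Finset.Ico c.1 c.2) := by
            rw [Finset.disjoint_left]; intro x hx hx2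
            have := hlt x hx; simp only [Finset.mem_Ico] at hx2; omega
          have hcard : (P.card : Int) + (c.2 - c.1) = (((P ∪ Finset.Ico c.1 c.2).card : ℕ) : Int) := by
            rw [Finset.card_union_of_disjoint hdisj, Int.card_Ico]; push_cast; omega
          rw [hcard, ih (P ∪ Finset.Ico c.1 c.2) c.2 c.1 hsort.2 (fun x hx => hsort.1 x hx)
            (by intro x hx
                rcases Finset.mem_union.mp hx with hx | hx
                · have := hlt x hx; omega
                · simp only [Finset.mem_Ico] at hx; omega)
            (by intro x hx; exact Finset.mem_union_right _ hx)]
          rw [covSet_cons]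
          congr 2
          ext x; simp only [Finset.mem_union]; tauto
        · have hstep : measStep ((P.card : Int), some en) c = ((P.card : Int), some en) := by
            simp [measStep, h1, h2]
          rw [hstep, ih P en s0 hsort.2 (fun x hx => le_trans hs0 (hsort.1 x hx)) hlt hsub]
          rw [covSet_cons]
          have : Finset.Ico c.1 c.2 = ∅ := Finset.Ico_eq_empty (by omega)
          rw [this]
          simp
      · by_cases h2 : c.2 > en
        · have hstep : measStep ((P.card : Int), some en) c
              = ((P.card : Int) + (c.2 - en), some c.2) := by
            simp [measStep, h1, h2]
          rw [hstep]
          have hP' : P ∪ Finset.Ico c.1 c.2 = P ∪ Finset.Ico en c.2 := by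
            ext x
            simp only [Finset.mem_union, Finset.mem_Ico]
            constructor
            · rintro (hx | hx)
              · exact Or.inl hx
              · by_cases hen : x < en
                · exact Or.inl (hsub (Finset.mem_Ico.mpr (by omega)))
                · exact Or.inr (by omega)
            · rintro (hx | hx)
              · exact Or.inl hx
              · exact Or.inr (by omega)
          have hdisj : Disjoint P (Finset.Ico en c.2) := by
            rw [Finset.disjoint_left]; intro x hx hx2
            have := hlt x hx; simp only [Finset.mem_Ico] at hx2; omega
          have hcard : (P.card : Int) + (c.2 - en) = (((P ∪ Finset.Ico c.1 c.2).card : ℕ) : Int) := by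
            rw [hP', Finset.card_union_of_disjoint hdisj, Int.card_Ico]; push_cast; omega
          rw [hcard, ih (P ∪ Finset.Ico c.1 c.2) c.2 c.1 hsort.2 (fun x hx => hsort.1 x hx)
            (by intro x hx
                rcases Finset.mem_union.mp hx with hx | hx
                · have := hlt x hx; omega
                · simp only [Finset.mem_Ico] at hx; omega)
            (by intro x hx
                simp only [Finset.mem_Ico] at hx
                exact Finset.mem_union_right _ (Finset.mem_Ico.mpr hx))]
          rw [covSet_cons]
          congr 2
          ext x; simp only [Finset.mem_union]; tauto
        · have hstep : measStep ((P.card : Int), some en) c = ((P.card : Int), some en) := by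
            simp [measStep, h1, h2]
          have hPI : P ∪ Finset.Ico c.1 c.2 = P := by
            apply Finset.union_eq_left.mpr
            intro x hx
            simp only [Finset.mem_Ico] at hx
            exact hsub (Finset.mem_Ico.mpr (by omega))
          rw [hstep, ih P en s0 hsort.2 (fun x hx => le_trans hs0 (hsort.1 x hx)) hlt hsub]
          rw [covSet_cons]
          congr 2
          rw [← Finset.union_assoc, hPI]

theorem meas_aux_none (r : List (Int × Int))
    (hs : List.Pairwise (fun p q : Int × Int => p.1 ≤ q.1) r) :
    (r.foldl measStep (0, none)).1 = (((covSet r).card : ℕ) : Int) := by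
  induction r with
  | nil => simp [covSet]
  | cons c t ih =>
      rw [List.pairwise_cons] at hs
      rw [List.foldl_cons]
      by_cases h2 : c.2 > c.1
      · have hstep : measStep (0, none) c = ((0 : Int) + (c.2 - c.1), some c.2) := by
          simp [measStep, h2]
        rw [hstep]
        have h0 : (0 : Int) + (c.2 - c.1) = (((Finset.Ico c.1 c.2).card : ℕ) : Int) := by
          rw [Int.card_Ico]; omega
        rw [h0, meas_aux_some t (Finset.Ico c.1 c.2) c.2 c.1 hs.2 hs.1
          (by intro x hx; simp only [Finset.mem_Ico] at hx; omega)
          (Finset.Subset.refl _)]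
        rw [covSet_cons]
      · have hstep : measStep (0, none) c = (0, none) := by simp [measStep, h2]
        rw [hstep, ih hs.2, covSet_cons]
        have : Finset.Ico c.1 c.2 = ∅ := Finset.Ico_eq_empty (by omega)
        rw [this]
        simp

theorem measure_eq (l : List (Int × Int)) :
    union_measure l = ((covSet l).card : Int) := by
  unfold union_measure
  rw [meas_aux_none _ (pairwise_fst_sorted l), covSet_sorted]

-- ===== VERDICT (by name: the statement is the Claim_ definition above) =====
theorem intersection_size_spec : Claim_equal_intersection_size := by
  intro a b _
  unfold Spec_intersection_size intersection_size_alt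
  rw [A_eq, measure_eq, measure_eq, measure_eq, covSet_append]
  have h := Finset.card_inter_add_card_union (covSet a) (covSet b)
  omega
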